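-- pv_equiv track=rewrite | github.com/eileensheu/adventofcode2021 | day10/syntax_scoring.py | compute_completion_strings_scores
-- ===== SOURCE A (Python) =====
-- completion_string_char_score_table = {")": 1, "]": 2, "}": 3, ">": 4}
--
-- def compute_completion_strings_scores(completion_strings):
--     completion_strings_scores = []
--     for string in completion_strings:
--         score = 0
--         for char in string:
--             score = score * 5 + completion_string_char_score_table[char]
--         completion_strings_scores.append(score)
--     return completion_strings_scores
-- ===== SOURCE B (Python) =====
-- _TABLE = {")": 1, "]": 2, "}": 3, ">": 4}
--
-- def _score(string):
--     n = len(string)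
--     return sum(_TABLE[char] * 5 ** (n - 1 - i) for i, char in enumerate(string))
--
-- def compute_completion_strings_scores(completion_strings):
--     return [_score(string) for string in completion_strings]
-- ===== Notes on version B (the rewrite author's own statement) =====
-- stated objective: alternative
-- what changed: Replaces A's Horner-style running accumulation (score*5+digit in an explicit loop appending to a result list) with a per-string sum of positional contributions table[char]*5**(len-1-i) over enumerate, mapped over the strings by a comprehension.
import Mathlib
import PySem

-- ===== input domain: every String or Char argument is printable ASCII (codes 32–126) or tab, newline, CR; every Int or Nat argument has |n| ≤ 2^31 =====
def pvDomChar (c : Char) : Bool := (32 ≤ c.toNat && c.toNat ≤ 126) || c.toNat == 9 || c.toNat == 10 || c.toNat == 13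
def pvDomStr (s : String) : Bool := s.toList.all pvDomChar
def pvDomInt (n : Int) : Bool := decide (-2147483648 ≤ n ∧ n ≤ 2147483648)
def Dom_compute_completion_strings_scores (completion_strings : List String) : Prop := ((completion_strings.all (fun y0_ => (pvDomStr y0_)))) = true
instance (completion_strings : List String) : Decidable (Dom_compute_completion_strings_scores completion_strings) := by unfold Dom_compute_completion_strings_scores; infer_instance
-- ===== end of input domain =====

-- B replaces A's Horner-style running accumulation with an explicit positional-power sum per string,
-- mapped over the input list (alternative decomposition, same cost). Return-value equivalence only.

-- ===== PORT A =====
-- module-level table; table[char] raises KeyError on other chars — such inputs are outside Pre_,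
-- so the lookup is ported as getD with default 0 (never reached inside Pre_).
def completion_string_char_score_table : PySem.Dict Char Int :=
  PySem.Dict.ofList [(')', 1), (']', 2), ('}', 3), ('>', 4)]

def compute_completion_strings_scores (completion_strings : List String) : List Int :=
  completion_strings.foldl
    (fun completion_strings_scores string =>
      completion_strings_scores ++
        [string.toList.foldl
          (fun score char => score * 5 + completion_string_char_score_table.getD char 0) 0])
    []

-- ===== PORT B =====
def pvTableB : PySem.Dict Char Int :=
  PySem.Dict.ofList [(')', 1), (']', 2), ('}', 3), ('>', 4)]

-- sum(table[char] * 5 ** (n-1-i) for i, char in enumerate(string)); the exponent n-1-i is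
-- always ≥ 0 inside the loop, so `.toNat` is exact there.
def pvScoreB (string : String) : Int :=
  let n : Int := (string.toList.length : Int)
  (PySem.List.enumerate string.toList 0).foldl
    (fun total p => total + pvTableB.getD p.2 0 * (5 : Int) ^ (n - 1 - p.1).toNat) 0

def compute_completion_strings_scores_alt (completion_strings : List String) : List Int :=
  completion_strings.map pvScoreB

-- ===== PRECONDITION & SPEC =====
-- Pre_ excludes exactly the inputs where the dict lookup raises KeyError in Python
-- (a character other than ) ] } > ); both A and B raise there.
def Pre_compute_completion_strings_scores (completion_strings : List String) : Prop :=
  (completion_strings.all fun s =>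
    s.toList.all fun c => c == ')' || c == ']' || c == '}' || c == '>') = true
instance (completion_strings : List String) : Decidable (Pre_compute_completion_strings_scores completion_strings) := by
  unfold Pre_compute_completion_strings_scores; infer_instance

def pvWitness_compute_completion_strings_scores : List String := ["", ")>]", "}}"]

def Spec_compute_completion_strings_scores (completion_strings : List String) (out : List Int) : Prop := out = compute_completion_strings_scores_alt completion_strings
instance (completion_strings : List String) (out : List Int) : Decidable (Spec_compute_completion_strings_scores completion_strings out) := by unfold Spec_compute_completion_strings_scores; infer_instance

-- ===== CLAIM (what is proved, stated in full; the proofs are below) =====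
def Claim_equal_compute_completion_strings_scores : Prop := ∀ (completion_strings : List String), Dom_compute_completion_strings_scores completion_strings → Pre_compute_completion_strings_scores completion_strings → Spec_compute_completion_strings_scores completion_strings (compute_completion_strings_scores completion_strings)

-- ===== LEMMAS AND PROOFS =====

-- Horner fold from an arbitrary accumulator, split into the accumulator part and the fold from 0.
theorem pv_horner_shift (l : List Char) (b : Int) :
    l.foldl (fun score char => score * 5 + completion_string_char_score_table.getD char 0) b
      = b * 5 ^ l.length
        + l.foldl (fun score char => score * 5 + completion_string_char_score_table.getD char 0) 0 := by
  induction l generalizing b with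
  | nil => simp
  | cons c t ih =>
    simp only [List.foldl_cons, List.length_cons]
    rw [ih (b * 5 + completion_string_char_score_table.getD c 0),
        ih (0 * 5 + completion_string_char_score_table.getD c 0)]
    ring

-- B's positional sum over an enumerate suffix equals acc plus the Horner fold of that suffix.
theorem pv_enum_sum (l : List Char) (k n acc : Int) (h : k + (l.length : Int) = n) :
    (PySem.List.enumerate l k).foldl
        (fun total p => total + pvTableB.getD p.2 0 * (5 : Int) ^ (n - 1 - p.1).toNat) acc
      = acc + l.foldl (fun score char => score * 5 + completion_string_char_score_table.getD char 0) 0 := by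
  induction l generalizing k acc with
  | nil => simp
  | cons c t ih =>
    rw [PySem.List.enumerate_cons]
    simp only [List.foldl_cons]
    rw [ih (k + 1) _ (by simp at h ⊢; omega)]
    have hexp : (n - 1 - k).toNat = t.length := by
      simp only [List.length_cons] at h; omega
    rw [hexp, pv_horner_shift t (0 * 5 + completion_string_char_score_table.getD c 0)]
    have htab : pvTableB.getD c 0 = completion_string_char_score_table.getD c 0 := rfl
    rw [htab]; ring

theorem pv_score_eq (s : String) :
    s.toList.foldl (fun score char => score * 5 + completion_string_char_score_table.getD char 0) 0
      = pvScoreB s := by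
  unfold pvScoreB
  rw [pv_enum_sum s.toList 0 (s.toList.length : Int) 0 (by simp)]
  ring

theorem pv_foldl_append_map (cs : List String) (acc : List Int) :
    cs.foldl
        (fun completion_strings_scores string =>
          completion_strings_scores ++
            [string.toList.foldl
              (fun score char => score * 5 + completion_string_char_score_table.getD char 0) 0])
        acc
      = acc ++ cs.map pvScoreB := by
  induction cs generalizing acc with
  | nil => simp
  | cons s t ih =>
    rw [List.foldl_cons, ih, pv_score_eq]
    simp

-- ===== VERDICT (by name: the statement is the Claim_ definition above) =====
theorem compute_completion_strings_scores_spec : Claim_equal_compute_completion_strings_scores := by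
  intro cs _ _
  show compute_completion_strings_scores cs = compute_completion_strings_scores_alt cs
  unfold compute_completion_strings_scores compute_completion_strings_scores_alt
  simpa using pv_foldl_append_map cs []
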